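-- pv_equiv track=rewrite | github.com/giladondon/ANONA | AnonaAI/featuresMaker.py | backspace_count
-- ===== SOURCE A (Python) =====
-- ENTER_KEY_CODE = 13
--
-- BACKSPACE_KEY_CODE = 8
--
-- def backspace_count(od):
--     """
--     :param od: key data of user ending with enter(key code 13).
--     :return:
--     :type od: ordered dictionary
--     """
--     backspace_ratio = []
--
--     key_count = 0
--     backspace_count = 0
--
--     for item in od:
--         key_count += 1
--         if item == ENTER_KEY_CODE:
--             backspace_ratio.append((backspace_count, key_count))
--             key_count = 0
--             backspace_count = 0
--         elif item == BACKSPACE_KEY_CODE: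
--                 backspace_count += 1
--
--     return backspace_ratio
-- ===== SOURCE B (Python) =====
-- ENTER_KEY_CODE = 13
--
-- BACKSPACE_KEY_CODE = 8
--
-- def backspace_count(od):
--     segments = []
--     cur = []
--     for item in od:
--         cur.append(item)
--         if item == ENTER_KEY_CODE:
--             segments.append(cur)
--             cur = []
--     return [(seg.count(BACKSPACE_KEY_CODE), len(seg)) for seg in segments]
-- ===== Notes on version B (the rewrite author's own statement) =====
-- stated objective: alternative
-- what changed: Replaces the single fused loop with running counters by a two-phase decomposition: first partition the stream into complete ENTER-terminated segments (dropping a trailing incomplete one), then map each segment to (its BACKSPACE count, its length) in a comprehension.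
import Mathlib
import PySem

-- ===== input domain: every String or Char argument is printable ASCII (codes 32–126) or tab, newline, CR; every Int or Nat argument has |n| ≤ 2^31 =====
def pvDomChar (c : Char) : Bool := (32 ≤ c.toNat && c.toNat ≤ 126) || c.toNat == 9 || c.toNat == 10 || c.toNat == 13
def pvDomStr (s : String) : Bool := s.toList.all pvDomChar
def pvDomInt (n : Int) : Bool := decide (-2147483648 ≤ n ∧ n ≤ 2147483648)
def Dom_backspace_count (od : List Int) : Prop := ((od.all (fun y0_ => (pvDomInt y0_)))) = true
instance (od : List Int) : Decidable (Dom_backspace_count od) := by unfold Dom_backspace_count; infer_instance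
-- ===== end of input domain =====

-- B replaces A's fused counting loop by a partition-into-segments pass followed by a per-segment counting comprehension (alternative decomposition, same cost).

-- ===== PORT A =====
-- A's single loop carrying (backspace_ratio, key_count, backspace_count)
def backspace_count (od : List Int) : List (Int × Int) :=
  (od.foldl
    (fun (st : List (Int × Int) × Int × Int) item =>
      let ratio := st.1
      let kc := st.2.1 + 1
      let bc := st.2.2
      if item == 13 then (ratio ++ [(bc, kc)], 0, 0)
      else if item == 8 then (ratio, kc, bc + 1)
      else (ratio, kc, bc))
    ([], 0, 0)).1

-- ===== PORT B =====
-- phase 1: partition od into complete ENTER-terminated segments (trailing incomplete segment discarded)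
def bcSegments (od : List Int) : List (List Int) × List Int :=
  od.foldl
    (fun (st : List (List Int) × List Int) item =>
      let cur := st.2 ++ [item]
      if item == 13 then (st.1 ++ [cur], []) else (st.1, cur))
    ([], [])

-- phase 2: map each segment to (count of BACKSPACE, length)
def backspace_count_alt (od : List Int) : List (Int × Int) :=
  (bcSegments od).1.map (fun seg => ((PySem.List.count seg 8 : Int), (seg.length : Int)))

-- ===== PRECONDITION & SPEC =====
def Spec_backspace_count (od : List Int) (out : List (Int × Int)) : Prop := out = backspace_count_alt od
instance (od : List Int) (out : List (Int × Int)) : Decidable (Spec_backspace_count od out) := by unfold Spec_backspace_count; infer_instance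

-- ===== CLAIM (what is proved, stated in full; the proofs are below) =====
def Claim_equal_backspace_count : Prop := ∀ (od : List Int), Dom_backspace_count od → Spec_backspace_count od (backspace_count od)

-- ===== LEMMAS AND PROOFS =====

-- loop invariant: A's state is the image of B's state under (map f, length, count 8)
theorem bc_loop_eq (od : List Int) (segs : List (List Int)) (cur : List Int) :
    (od.foldl
      (fun (st : List (Int × Int) × Int × Int) item =>
        let ratio := st.1
        let kc := st.2.1 + 1
        let bc := st.2.2
        if item == 13 then (ratio ++ [(bc, kc)], 0, 0)
        else if item == 8 then (ratio, kc, bc + 1)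
        else (ratio, kc, bc))
      (segs.map (fun seg => ((PySem.List.count seg 8 : Int), (seg.length : Int))),
        (cur.length : Int), (PySem.List.count cur 8 : Int))).1
    = ((od.foldl
        (fun (st : List (List Int) × List Int) item =>
          let cur := st.2 ++ [item]
          if item == 13 then (st.1 ++ [cur], []) else (st.1, cur))
        (segs, cur)).1).map (fun seg => ((PySem.List.count seg 8 : Int), (seg.length : Int))) := by
  induction od generalizing segs cur with
  | nil => simp
  | cons a rest ih =>
    simp only [List.foldl_cons]
    by_cases h13 : a = 13
    · subst h13
      have := ih (segs ++ [cur ++ [13]]) []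
      simpa [PySem.List.count_eq, List.count_append] using this
    · by_cases h8 : a = 8
      · subst h8
        have := ih segs (cur ++ [8])
        simp only [PySem.List.count_eq, List.count_append] at this ⊢
        simpa [Int.add_comm] using this
      · have := ih segs (cur ++ [a])
        simp only [PySem.List.count_eq, List.count_append] at this ⊢
        simpa [h13, h8, List.count_singleton, Ne.symm h8] using this

-- ===== VERDICT (by name: the statement is the Claim_ definition above) =====
theorem backspace_count_spec : Claim_equal_backspace_count := by
  intro od _
  unfold Spec_backspace_count backspace_count backspace_count_alt bcSegments
  simpa using bc_loop_eq od [] []
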